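-- pv_equiv track=rewrite | github.com/klogins-hash/pipecat-agent-builder | bot.py | _parse_generated_code
-- ===== SOURCE A (Python) =====
-- from typing import Dict, List, Any
--
-- def _parse_generated_code(response: str, requirements: Dict) -> Dict[str, str]:
--     """Parse the generated response into separate files."""
--     files = {}
--     current_file = None
--     current_content = []
--
--     for line in response.split('\n'):
--         if line.startswith('FILE: '):
--             if current_file:
--                 files[current_file] = '\n'.join(current_content)
--             current_file = line.replace('FILE: ', '').strip()
--             current_content = []
--         elif current_file:
--             current_content.append(line)
--
--     # Add the last file
--     if current_file:
--         files[current_file] = '\n'.join(current_content)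
--
--     return files
-- ===== SOURCE B (Python) =====
-- def _parse_generated_code(response, requirements):
--     """Block-wise: drop the preamble, then repeatedly consume a header and its body."""
--     files = {}
--     lines = response.split('\n')
--     while lines and not lines[0].startswith('FILE: '):
--         lines = lines[1:]
--     while lines:
--         name = lines[0].replace('FILE: ', '').strip()
--         lines = lines[1:]
--         body = []
--         while lines and not lines[0].startswith('FILE: '):
--             body.append(lines[0])
--             lines = lines[1:]
--         if name:
--             files[name] = '\n'.join(body)
--     return files
-- ===== Notes on version B (the rewrite author's own statement) =====
-- stated objective: alternative
-- what changed: A carries mutable (current_file, current_content) state through one line loop with a post-loop flush; B first drops the preamble, then repeatedly consumes a header line and the span of following non-header lines as one block, with no carried state or final flush.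
import Mathlib
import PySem

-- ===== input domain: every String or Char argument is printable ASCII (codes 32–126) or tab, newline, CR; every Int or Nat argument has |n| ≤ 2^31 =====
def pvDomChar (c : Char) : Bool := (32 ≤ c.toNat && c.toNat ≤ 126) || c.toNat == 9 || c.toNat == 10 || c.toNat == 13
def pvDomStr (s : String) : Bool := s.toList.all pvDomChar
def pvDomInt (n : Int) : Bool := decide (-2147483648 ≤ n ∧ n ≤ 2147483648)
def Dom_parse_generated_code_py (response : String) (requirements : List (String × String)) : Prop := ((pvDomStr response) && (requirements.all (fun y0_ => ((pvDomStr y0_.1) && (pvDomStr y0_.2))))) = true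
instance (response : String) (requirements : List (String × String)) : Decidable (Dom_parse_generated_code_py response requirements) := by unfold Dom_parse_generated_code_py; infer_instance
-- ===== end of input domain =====

-- B parses block-wise (drop preamble, then header+body spans) instead of A's stateful line loop; same return value, objective: alternative decomposition.
-- ===== PORT A =====
-- Single left-to-right pass carrying (files, current_file, current_content); final flush after the loop.
def pvA_loop : List String → PySem.Dict String String → Option String → List String →
    PySem.Dict String String × Option String × List String
  | [], files, cur, content => (files, cur, content)
  | l :: ls, files, cur, content =>
    if PySem.Str.startswith l "FILE: " then
      pvA_loop ls
        (match cur with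
         | some c => if c ≠ "" then files.insert c (PySem.Str.join "\n" content) else files
         | none => files)
        (some (PySem.Str.strip (PySem.Str.replace l "FILE: " ""))) []
    else
      match cur with
      | some c =>
        if c ≠ "" then pvA_loop ls files cur (content ++ [l])
        else pvA_loop ls files cur content
      | none => pvA_loop ls files cur content

def parse_generated_code_py (response : String) (requirements : List (String × String)) : List (String × String) :=
  let r := pvA_loop (((PySem.Str.split? response "\n").getD [])) PySem.Dict.empty none []
  (match r.2.1 with
   | some c => if c ≠ "" then r.1.insert c (PySem.Str.join "\n" r.2.2) else r.1
   | none => r.1).items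

-- ===== PORT B =====
-- Block-wise: drop the preamble, then repeatedly consume a header line and its body (span of non-header lines).
def pvB_drop : List String → List String
  | [] => []
  | l :: ls => if PySem.Str.startswith l "FILE: " then l :: ls else pvB_drop ls

def pvB_span : List String → List String × List String
  | [] => ([], [])
  | l :: ls =>
    if PySem.Str.startswith l "FILE: " then ([], l :: ls)
    else ((l :: (pvB_span ls).1), (pvB_span ls).2)

theorem pvB_span_len : ∀ ls : List String, (pvB_span ls).2.length ≤ ls.length
  | [] => Nat.le_refl _
  | l :: ls => by
    simp only [pvB_span]
    split
    · simp
    · exact Nat.le_succ_of_le (pvB_span_len ls)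

def pvB_blocks : List String → PySem.Dict String String → PySem.Dict String String
  | [], files => files
  | l :: ls, files =>
    let name := PySem.Str.strip (PySem.Str.replace l "FILE: " "")
    pvB_blocks (pvB_span ls).2
      (if name ≠ "" then files.insert name (PySem.Str.join "\n" (pvB_span ls).1) else files)
  termination_by ls _ => ls.length
  decreasing_by exact Nat.lt_succ_of_le (pvB_span_len ls)

def parse_generated_code_py_alt (response : String) (requirements : List (String × String)) : List (String × String) :=
  (pvB_blocks (pvB_drop (((PySem.Str.split? response "\n").getD []))) PySem.Dict.empty).items

-- ===== PRECONDITION & SPEC =====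
def Spec_parse_generated_code_py (response : String) (requirements : List (String × String)) (out : List (String × String)) : Prop := out = parse_generated_code_py_alt response requirements
instance (response : String) (requirements : List (String × String)) (out : List (String × String)) : Decidable (Spec_parse_generated_code_py response requirements out) := by unfold Spec_parse_generated_code_py; infer_instance

-- ===== CLAIM (what is proved, stated in full; the proofs are below) =====
def Claim_equal_parse_generated_code_py : Prop := ∀ (response : String) (requirements : List (String × String)), Dom_parse_generated_code_py response requirements → Spec_parse_generated_code_py response requirements (parse_generated_code_py response requirements)

-- ===== LEMMAS AND PROOFS =====
def pvFlush : PySem.Dict String String × Option String × List String → PySem.Dict String String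
  | (files, some c, content) => if c ≠ "" then files.insert c (PySem.Str.join "\n" content) else files
  | (files, none, _) => files

theorem pvA_some_eq_blocks (ls : List String) :
    ∀ (files : PySem.Dict String String) (c : String) (content : List String),
    pvFlush (pvA_loop ls files (some c) content) =
      pvB_blocks (pvB_span ls).2
        (if c ≠ "" then files.insert c (PySem.Str.join "\n" (content ++ (pvB_span ls).1)) else files) := by
  induction ls with
  | nil =>
    intro files c content
    simp [pvA_loop, pvB_span, pvB_blocks, pvFlush]
  | cons l ls ih =>
    intro files c content
    by_cases h : PySem.Str.startswith l "FILE: " = true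
    · simp only [pvA_loop, h, if_pos]
      rw [ih]
      conv_rhs => rw [show pvB_span (l :: ls) = ([], l :: ls) from by rw [pvB_span, if_pos h],
        pvB_blocks]
      simp
    · have hb : PySem.Str.startswith l "FILE: " = false := by simpa using h
      have hs : pvB_span (l :: ls) = (l :: (pvB_span ls).1, (pvB_span ls).2) := by
        rw [pvB_span, if_neg h]
      rw [hs]
      by_cases hc : c = ""
      · subst hc
        simp only [pvA_loop, hb, Bool.false_eq_true, if_false, ne_eq, not_true_eq_false,
          ite_false]
        rw [ih]
        simp
      · simp only [pvA_loop, hb, Bool.false_eq_true, if_false, ne_eq, hc, not_false_eq_true,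
          ite_true]
        rw [ih]
        simp [hc, List.append_assoc]

theorem pvA_none_eq_blocks (ls : List String) :
    ∀ files : PySem.Dict String String,
    pvFlush (pvA_loop ls files none []) = pvB_blocks (pvB_drop ls) files := by
  induction ls with
  | nil => intro files; simp [pvA_loop, pvB_drop, pvB_blocks, pvFlush]
  | cons l ls ih =>
    intro files
    by_cases h : PySem.Str.startswith l "FILE: " = true
    · simp only [pvA_loop, h, if_pos]
      rw [pvA_some_eq_blocks]
      conv_rhs => rw [show pvB_drop (l :: ls) = l :: ls from by rw [pvB_drop, if_pos h],
        pvB_blocks]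
      simp
    · have hb : PySem.Str.startswith l "FILE: " = false := by simpa using h
      simp only [pvA_loop, hb, Bool.false_eq_true, if_false]
      rw [ih]
      rw [show pvB_drop (l :: ls) = pvB_drop ls from by rw [pvB_drop, if_neg h]]

-- ===== VERDICT (by name: the statement is the Claim_ definition above) =====
theorem parse_generated_code_py_spec : Claim_equal_parse_generated_code_py := by
  intro response requirements _
  unfold Spec_parse_generated_code_py parse_generated_code_py parse_generated_code_py_alt
  rw [← pvA_none_eq_blocks]
  rcases hres : pvA_loop (((PySem.Str.split? response "\n").getD [])) PySem.Dict.empty none [] with ⟨files, cur, content⟩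
  cases cur <;> simp [pvFlush]
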